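-- pv_equiv track=rewrite | github.com/ck3user75233/ck3raven | tools/arch_lint/rules.py | match_composite_tokens
-- ===== SOURCE A (Python) =====
-- from typing import Optional
--
-- def match_composite_tokens(tokens: list[str], pattern: str) -> Optional[tuple[int, int]]:
--     """
--     Match a composite pattern like 'a%b%c'.
--     Returns (start_idx, end_idx) or None.
--     """
--     parts = [p.strip().lower() for p in pattern.split("%") if p.strip()]
--     if not parts:
--         return None
--
--     start = 0
--     first_pos = None
--     last_pos = None
--
--     for p in parts:
--         try:
--             idx = tokens.index(p, start)
--         except ValueError:
--             return None
--         if first_pos is None: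
--             first_pos = idx
--         last_pos = idx
--         start = idx + 1
--
--     return (first_pos or 0, (last_pos or 0) + 1)
-- ===== SOURCE B (Python) =====
-- from typing import Optional
--
-- def match_composite_tokens(tokens: list[str], pattern: str) -> Optional[tuple[int, int]]:
--     """Single forward scan over tokens advancing through the pattern parts."""
--     parts = [q for q in (p.strip().lower() for p in pattern.split("%")) if q]
--     if not parts:
--         return None
--     remaining = parts
--     first_pos = None
--     for i, tok in enumerate(tokens):
--         if tok == remaining[0]:
--             if first_pos is None:
--                 first_pos = i
--             remaining = remaining[1:]
--             if not remaining:
--                 return (first_pos, i + 1)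
--     return None
-- ===== Notes on version B (the rewrite author's own statement) =====
-- stated objective: simpler
-- what changed: A searches tokens once per pattern part via repeated tokens.index(p, start); B makes a single flat scan over tokens advancing a pointer through the parts, setting first_pos at the first match and returning at the last.
import Mathlib
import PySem

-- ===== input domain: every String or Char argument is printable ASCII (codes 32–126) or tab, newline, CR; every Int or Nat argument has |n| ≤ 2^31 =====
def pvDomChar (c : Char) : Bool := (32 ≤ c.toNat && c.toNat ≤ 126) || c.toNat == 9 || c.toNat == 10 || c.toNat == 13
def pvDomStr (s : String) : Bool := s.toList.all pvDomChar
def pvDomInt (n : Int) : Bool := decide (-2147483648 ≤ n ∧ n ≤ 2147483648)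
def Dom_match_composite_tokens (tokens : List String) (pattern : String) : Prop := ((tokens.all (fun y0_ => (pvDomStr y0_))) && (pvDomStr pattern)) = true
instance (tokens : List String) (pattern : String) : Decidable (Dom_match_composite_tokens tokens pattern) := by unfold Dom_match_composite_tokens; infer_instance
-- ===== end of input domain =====

-- B replaces A's per-part `tokens.index(p, start)` searches by one flat scan over tokens
-- advancing a pointer through the parts (objective: simpler / one pass; same O(n·k) worst case).

-- ===== PORT A =====

-- tokens.index(p, start) with 0 ≤ start (A only ever passes 0 or idx+1):
-- first index ≥ start whose element equals p; none = ValueError.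
def pvIndexFrom (xs : List String) (x : String) (start : Nat) : Option Nat :=
  match xs, start with
  | [], _ => none
  | y :: ys, 0 => if y = x then some 0 else (pvIndexFrom ys x 0).map (· + 1)
  | _ :: ys, s + 1 => (pvIndexFrom ys x s).map (· + 1)

-- A's for-loop over parts, state (start, first_pos, last_pos).
-- the final `(first_pos or 0, (last_pos or 0) + 1)`: `o or 0` equals o.getD 0 exactly
-- (None → 0, 0 → 0, v → v).
def pvALoop (tokens : List String) (parts : List String) (start : Nat)
    (first last : Option Nat) : Option (Int × Int) :=
  match parts with
  | [] => some ((first.getD 0 : Nat), ((last.getD 0 : Nat) + 1 : Nat))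
  | p :: rest =>
    match pvIndexFrom tokens p start with
    | none => none
    | some idx =>
      pvALoop tokens rest (idx + 1)
        (match first with | none => some idx | some f => some f) (some idx)

def match_composite_tokens (tokens : List String) (pattern : String) : Option (Int × Int) :=
  -- pattern.split("%"): sep "%" ≠ "" so split? is always `some`
  let parts := ((PySem.Str.split? pattern "%").getD []).filterMap
      (fun p => if PySem.Str.strip p = "" then none else some (PySem.Str.lower (PySem.Str.strip p)))
  if parts = [] then none
  else pvALoop tokens parts 0 none none

-- ===== PORT B =====

-- B's for-loop over enumerate(tokens), carrying (remaining parts, first_pos, index i).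
def pvBScan (toks : List String) (remaining : List String) (first : Option Nat)
    (i : Nat) : Option (Int × Int) :=
  match toks, remaining with
  | [], _ => none
  | _ :: _, [] => none   -- unreachable: remaining is nonempty on every call
  | tok :: ts, p :: rest =>
    if tok = p then
      let first' := match first with | none => some i | some f => some f
      match rest with
      | [] => some ((first'.getD 0 : Nat), ((i + 1 : Nat) : Int))
      | _ :: _ => pvBScan ts rest first' (i + 1)
    else pvBScan ts (p :: rest) first (i + 1)

def match_composite_tokens_alt (tokens : List String) (pattern : String) : Option (Int × Int) :=
  let parts := (((PySem.Str.split? pattern "%").getD []).map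
      (fun p => PySem.Str.lower (PySem.Str.strip p))).filter (fun q => q ≠ "")
  if parts = [] then none
  else pvBScan tokens parts none 0

-- ===== PRECONDITION & SPEC =====
def Spec_match_composite_tokens (tokens : List String) (pattern : String) (out : Option (Int × Int)) : Prop := out = match_composite_tokens_alt tokens pattern
instance (tokens : List String) (pattern : String) (out : Option (Int × Int)) : Decidable (Spec_match_composite_tokens tokens pattern out) := by unfold Spec_match_composite_tokens; infer_instance

-- ===== CLAIM (what is proved, stated in full; the proofs are below) =====
def Claim_equal_match_composite_tokens : Prop := ∀ (tokens : List String) (pattern : String), Dom_match_composite_tokens tokens pattern → Spec_match_composite_tokens tokens pattern (match_composite_tokens tokens pattern)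

-- ===== LEMMAS AND PROOFS =====

-- the two parts computations agree: lower preserves emptiness
theorem pv_lower_empty_iff (s : String) : PySem.Str.lower s = "" ↔ s = "" := by
  constructor
  · intro h
    have := congrArg String.toList h
    rw [PySem.Str.toList_lower] at this
    simp [PySem.Chars.lower] at this
    exact this
  · intro h; subst h; decide

theorem pv_parts_eq (l : List String) :
    l.filterMap (fun p => if PySem.Str.strip p = "" then none
        else some (PySem.Str.lower (PySem.Str.strip p)))
    = (l.map (fun p => PySem.Str.lower (PySem.Str.strip p))).filter (fun q => q ≠ "") := by
  induction l with
  | nil => rfl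
  | cons p rest ih =>
    simp only [List.filterMap_cons, List.map_cons, List.filter_cons]
    by_cases h : PySem.Str.strip p = ""
    · simp [h, pv_lower_empty_iff, ih]
    · simp [h, (pv_lower_empty_iff (PySem.Str.strip p)).not.mpr h, ih]

-- pvIndexFrom as findIdx? on the dropped suffix
theorem pv_indexFrom_eq (xs : List String) (x : String) (s : Nat) :
    pvIndexFrom xs x s = ((xs.drop s).findIdx? (· = x)).map (· + s) := by
  induction xs generalizing s with
  | nil => simp [pvIndexFrom]
  | cons y ys ih =>
    cases s with
    | zero =>
      simp only [pvIndexFrom, List.drop_zero, List.findIdx?_cons]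
      by_cases h : y = x
      · simp [h]
      · simp [h, ih 0, Function.comp_def]
    | succ n =>
      simp only [pvIndexFrom, List.drop_succ_cons, ih n, Option.map_map]
      congr 1

-- main invariant: A's per-part index loop equals B's flat scan on the suffix
theorem pv_loop_eq (suffix : List String) : ∀ (tokens : List String) (n : Nat)
    (p : String) (rest : List String) (first last : Option Nat),
    tokens.drop n = suffix →
    pvALoop tokens (p :: rest) n first last = pvBScan suffix (p :: rest) first n := by
  induction suffix with
  | nil =>
    intro tokens n p rest first last hdrop
    simp [pvALoop, pvBScan, pv_indexFrom_eq, hdrop]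
  | cons t ts ih =>
    intro tokens n p rest first last hdrop
    have hdrop' : tokens.drop (n + 1) = ts := by
      have := congrArg (List.drop 1) hdrop
      simpa [List.drop_drop, Nat.add_comm 1 n] using this
    by_cases h : t = p
    · -- head matches: A finds idx = n
      have hidx : pvIndexFrom tokens p n = some n := by
        rw [pv_indexFrom_eq, hdrop, List.findIdx?_cons]
        simp [h]
      cases rest with
      | nil =>
        simp [pvALoop, hidx, pvBScan, h]
      | cons q qs =>
        simp only [pvALoop, hidx, pvBScan, if_pos h]
        exact ih tokens (n + 1) q qs _ (some n) hdrop'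
    · -- head mismatch: A's search from n equals search from n+1
      have hidx : pvIndexFrom tokens p n = pvIndexFrom tokens p (n + 1) := by
        rw [pv_indexFrom_eq, pv_indexFrom_eq, hdrop, hdrop', List.findIdx?_cons]
        simp only [h, decide_false, Bool.false_eq_true, if_false, Option.map_map]
        congr 1; funext k; simp only [Function.comp_apply]; omega
      have := ih tokens (n + 1) p rest first last hdrop'
      simp only [pvALoop, hidx, pvBScan, if_neg h]
      cases hfind : pvIndexFrom tokens p (n + 1) with
      | none => simp [pvALoop, hfind] at this ⊢; exact this
      | some idx => simpa [pvALoop, hfind] using this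

-- ===== VERDICT (by name: the statement is the Claim_ definition above) =====
theorem match_composite_tokens_spec : Claim_equal_match_composite_tokens := by
  intro tokens pattern _
  unfold Spec_match_composite_tokens match_composite_tokens match_composite_tokens_alt
  rw [pv_parts_eq]
  cases hp : (((PySem.Str.split? pattern "%").getD []).map
      (fun p => PySem.Str.lower (PySem.Str.strip p))).filter (fun q => q ≠ "") with
  | nil => simp
  | cons p rest =>
    simp only [if_neg (by simp : p :: rest ≠ [])]
    exact pv_loop_eq tokens tokens 0 p rest none none (by simp)
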